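-- pv_equiv track=rewrite | github.com/Enjef/Algo | 300 - 399/318 - Maximum Product of Word Lengths/318 - Maximum Product of Word Lengths.py | maxProduct_best_memory
-- ===== SOURCE A (Python) =====
-- from typing import List
--
-- def maxProduct_best_memory(words: List[str]) -> int:
--     bitmaps = []
--     for w in words:
--         bmp = 0
--         for c in w:
--             bmp |= 1 << (ord(c) - ord('a'))
--         bitmaps.append(bmp)
--     best = 0
--     for i in range(len(bitmaps)):
--         for j in range(i + 1, len(bitmaps)):
--             if not bitmaps[i] & bitmaps[j]:
--                 best = max(best, len(words[i]) * len(words[j]))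
--     return best
-- ===== SOURCE B (Python) =====
-- from typing import List
--
-- def maxProduct_best_memory(words: List[str]) -> int:
--     # generate-sort-select: list every pair's (product, disjoint?) candidate,
--     # sort candidates by product descending, return the first feasible one.
--     masks = []
--     for w in words:
--         m = 0
--         for c in w:
--             m |= 1 << (ord(c) - ord('a'))
--         masks.append(m)
--     cands = []
--     for i in range(len(words)):
--         for j in range(i + 1, len(words)):
--             cands.append((len(words[i]) * len(words[j]), masks[i] & masks[j] == 0))
--     cands.sort(key=lambda t: t[0], reverse=True)
--     for prod, ok in cands:
--         if ok:
--             return prod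
--     return 0
-- ===== Notes on version B (the rewrite author's own statement) =====
-- stated objective: alternative
-- what changed: B replaces A's incremental running-max over pairs by a generate-sort-select algorithm: it lists every pair's (product, disjoint?) candidate, sorts the candidates by product descending, and returns the first feasible product (0 if none).
import Mathlib
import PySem

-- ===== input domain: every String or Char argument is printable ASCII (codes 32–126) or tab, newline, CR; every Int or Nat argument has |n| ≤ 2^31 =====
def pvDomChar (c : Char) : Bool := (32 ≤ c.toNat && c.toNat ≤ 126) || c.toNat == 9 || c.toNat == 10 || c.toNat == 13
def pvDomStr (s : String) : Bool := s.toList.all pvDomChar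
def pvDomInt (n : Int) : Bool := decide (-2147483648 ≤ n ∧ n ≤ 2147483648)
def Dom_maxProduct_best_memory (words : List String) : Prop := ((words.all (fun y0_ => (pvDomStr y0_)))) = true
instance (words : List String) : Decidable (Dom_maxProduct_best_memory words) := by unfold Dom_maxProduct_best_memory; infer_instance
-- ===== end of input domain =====

-- B replaces A's incremental running-max over pairs by generate-sort-select: list every pair's
-- (product, disjoint?) candidate, sort by product descending, return the first feasible one (alternative algorithm, not claimed faster).

-- bmp |= 1 << (ord(c) - ord('a'))  accumulated over the word's characters (identical inline loop in A and B)
def pvMask (w : String) : Nat :=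
  w.toList.foldl (fun b c => b ||| (1 <<< (c.toNat - 97))) 0

-- ===== PORT A =====
def maxProduct_best_memory (words : List String) : Int :=
  let bitmaps := words.foldl (fun acc w => acc ++ [pvMask w]) ([] : List Nat)
  (List.range bitmaps.length).foldl (fun best i =>
    ((List.range bitmaps.length).drop (i + 1)).foldl (fun best j =>
      if bitmaps.getD i 0 &&& bitmaps.getD j 0 == 0 then
        max best (((words.getD i "").length : Int) * ((words.getD j "").length : Int))
      else best) best) 0

-- ===== PORT B =====
def maxProduct_best_memory_alt (words : List String) : Int :=
  let masks := words.foldl (fun acc w => acc ++ [pvMask w]) ([] : List Nat)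
  let cands := (List.range words.length).foldl (fun acc i =>
      ((List.range words.length).drop (i + 1)).foldl (fun acc j =>
        acc ++ [(((words.getD i "").length : Int) * ((words.getD j "").length : Int),
                 masks.getD i 0 &&& masks.getD j 0 == 0)]) acc) ([] : List (Int × Bool))
  let sortedCands := PySem.List.sorted cands (fun t => t.1) true
  match sortedCands.find? (fun t => t.2) with
  | some t => t.1
  | none => 0

-- ===== PRECONDITION & SPEC =====
-- Pre_ excludes exactly the inputs on which the Python A raises ValueError ("negative shift
-- count"): a word containing a character below 'a' (code < 97).  B raises there too.
def Pre_maxProduct_best_memory (words : List String) : Prop :=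
  (words.all (fun w => w.toList.all (fun c => 97 ≤ c.toNat))) = true
instance (words : List String) : Decidable (Pre_maxProduct_best_memory words) := by
  unfold Pre_maxProduct_best_memory; infer_instance
def pvWitness_maxProduct_best_memory : List String := ["abc", "de", "ab"]

def Spec_maxProduct_best_memory (words : List String) (out : Int) : Prop := out = maxProduct_best_memory_alt words
instance (words : List String) (out : Int) : Decidable (Spec_maxProduct_best_memory words out) := by unfold Spec_maxProduct_best_memory; infer_instance

-- ===== CLAIM (what is proved, stated in full; the proofs are below) =====
def Claim_equal_maxProduct_best_memory : Prop := ∀ (words : List String), Dom_maxProduct_best_memory words → Pre_maxProduct_best_memory words → Spec_maxProduct_best_memory words (maxProduct_best_memory words)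

-- ===== LEMMAS AND PROOFS =====

-- the running-max loop shape: max of f over the elements satisfying q, folded from b
def pvF {α : Type} (q : α → Bool) (f : α → Int) (b : Int) (l : List α) : Int :=
  l.foldl (fun b x => if q x then max b (f x) else b) b

theorem pvF_init_le {α : Type} (q : α → Bool) (f : α → Int) (b : Int) (l : List α) :
    b ≤ pvF q f b l := by
  induction l generalizing b with
  | nil => simp [pvF]
  | cons a t ih =>
      refine le_trans ?_ (ih (if q a then max b (f a) else b))
      split <;> simp

theorem pvF_le {α : Type} (q : α → Bool) (f : α → Int) {b c : Int} {l : List α}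
    (hb : b ≤ c) (h : ∀ x ∈ l, q x = true → f x ≤ c) : pvF q f b l ≤ c := by
  induction l generalizing b with
  | nil => simpa [pvF] using hb
  | cons a t ih =>
      simp only [pvF, List.foldl_cons] at *
      apply ih
      · split
        · next hq => exact max_le hb (h a (by simp) hq)
        · exact hb
      · exact fun x hx hq => h x (by simp [hx]) hq

-- nested "for i … for j in g i" max fold = pvF over the flattened pair list
theorem pvF_nested {ι κ : Type} (g : ι → List κ) (q : ι → κ → Bool) (f : ι → κ → Int)
    (l : List ι) (b : Int) :
    l.foldl (fun b i => (g i).foldl (fun b j => if q i j then max b (f i j) else b) b) b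
      = pvF (fun p : ι × κ => q p.1 p.2) (fun p => f p.1 p.2) b
          (l.flatMap (fun i => (g i).map (fun j => (i, j)))) := by
  induction l generalizing b with
  | nil => simp [pvF]
  | cons a t ih => simp [pvF, List.foldl_map, ih, List.foldl_append]

theorem foldl_append_singleton {α β : Type} (f : α → β) (l : List α) (acc : List β) :
    l.foldl (fun acc x => acc ++ [f x]) acc = acc ++ l.map f := by
  induction l generalizing acc with
  | nil => simp
  | cons a t ih => simp [ih]

-- "for x: acc += chunk(x)" = acc ++ flatMap
theorem foldl_append_chunks {α β : Type} (m : α → List β) (l : List α) (acc : List β) :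
    l.foldl (fun acc x => acc ++ m x) acc = acc ++ l.flatMap m := by
  induction l generalizing acc with
  | nil => simp
  | cons a t ih => simp [ih]

theorem pvF_map {α β : Type} (q : β → Bool) (f : β → Int) (h : α → β) (b : Int) (l : List α) :
    pvF q f b (l.map h) = pvF (fun x => q (h x)) (fun x => f (h x)) b l := by
  simp [pvF, List.foldl_map]

theorem flatMap_map_pair {ι κ β : Type} (g : ι → List κ) (h : ι → κ → β) (l : List ι) :
    l.flatMap (fun i => (g i).map (h i))
      = (l.flatMap (fun i => (g i).map (fun j => (i, j)))).map (fun p => h p.1 p.2) := by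
  simp [List.map_flatMap, List.map_map, Function.comp_def]

-- pvF = running max over the filtered list
theorem pvF_eq_filter {α : Type} (q : α → Bool) (f : α → Int) (b : Int) (l : List α) :
    pvF q f b l = pvF (fun _ => true) f b (l.filter q) := by
  induction l generalizing b with
  | nil => rfl
  | cons a t ih =>
      by_cases hq : q a = true
      · rw [List.filter_cons_of_pos hq]
        simpa [pvF, hq] using ih (max b (f a))
      · rw [List.filter_cons_of_neg (by simpa using hq)]
        simpa [pvF, hq] using ih b

-- running max is invariant under permutation
theorem pvF_perm {α : Type} (f : α → Int) (b : Int) {l l' : List α} (h : l.Perm l') :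
    pvF (fun _ => true) f b l = pvF (fun _ => true) f b l' := by
  unfold pvF
  exact h.foldl_eq' (fun x _ y _ z => by simp [max_right_comm]) b

-- first feasible element of the descending-sorted candidates = max feasible product
theorem sorted_select_eq (cands : List (Int × Bool))
    (hpos : ∀ x ∈ cands, 0 ≤ x.1) :
    (match (PySem.List.sorted cands (fun t => t.1) true).find? (fun t => t.2) with
      | some t => t.1
      | none => (0 : Int))
      = pvF Prod.snd Prod.fst 0 cands := by
  set s := PySem.List.sorted cands (fun t => t.1) true with hs
  have hperm : s.Perm cands := PySem.List.sorted_perm _ _ _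
  have hpair : s.Pairwise (fun a b => b.1 ≤ a.1) := PySem.List.sorted_pairwise_rev _ _
  rw [pvF_eq_filter, ← pvF_perm Prod.fst 0 (hperm.filter _)]
  have hfind : s.find? (fun t => t.2) = (s.filter (fun t => t.2)).head? := by
    clear hpair hs
    induction s with
    | nil => rfl
    | cons a t ih =>
        by_cases h : a.2 = true
        · rw [List.find?_cons_of_pos (by simpa using h),
              List.filter_cons_of_pos (by simpa using h)]
          rfl
        · rw [List.find?_cons_of_neg (by simpa using h),
              List.filter_cons_of_neg (by simpa using h), ih]
  rw [hfind]
  have hfpair : (s.filter (fun t => t.2)).Pairwise (fun a b => b.1 ≤ a.1) :=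
    hpair.sublist List.filter_sublist
  cases hf : s.filter (fun t => t.2) with
  | nil => simp [pvF]
  | cons m rest =>
      have hmem' : m ∈ s.filter (fun t => t.2) := by rw [hf]; exact List.mem_cons_self
      have hm0 : 0 ≤ m.1 := hpos m (hperm.subset (List.mem_of_mem_filter hmem'))
      have hrest : ∀ x ∈ rest, x.1 ≤ m.1 := by
        rw [hf] at hfpair
        exact fun x hx => (List.pairwise_cons.mp hfpair).1 x hx
      show m.1 = pvF (fun _ => true) Prod.fst 0 (m :: rest)
      refine (le_antisymm ?_ ?_).symm
      · refine pvF_le _ _ hm0 ?_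
        intro x hx _
        rcases List.mem_cons.mp hx with rfl | hx'
        · exact le_refl _
        · exact hrest x hx'
      · have hstep : pvF (fun _ : Int × Bool => true) Prod.fst 0 (m :: rest)
            = pvF (fun _ : Int × Bool => true) Prod.fst (max 0 m.1) rest := by
          simp [pvF]
        rw [hstep]
        exact le_trans (le_max_right 0 m.1)
          (pvF_init_le (fun _ : Int × Bool => true) Prod.fst (max 0 m.1) rest)

-- ===== VERDICT (by name: the statement is the Claim_ definition above) =====
theorem maxProduct_best_memory_spec : Claim_equal_maxProduct_best_memory := by
  intro words _ _
  unfold Spec_maxProduct_best_memory maxProduct_best_memory maxProduct_best_memory_alt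
  dsimp only
  simp only [foldl_append_singleton, foldl_append_chunks, List.nil_append, List.length_map]
  rw [pvF_nested, sorted_select_eq]
  · rw [flatMap_map_pair (fun i => List.drop (i + 1) (List.range words.length))
        (fun i j => (((words.getD i "").length : Int) * ((words.getD j "").length : Int),
          (words.map pvMask).getD i 0 &&& (words.map pvMask).getD j 0 == 0))
        (List.range words.length), pvF_map]
  · intro x hx
    simp only [List.mem_flatMap, List.mem_map] at hx
    obtain ⟨i, _, j, _, rfl⟩ := hx
    positivity
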